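-- pv_equiv track=rewrite | github.com/emory-courses/nlp-essentials | src/tokenization.py | delimit
-- ===== SOURCE A (Python) =====
-- def delimit(word: str, delimiters: set[str]) -> list[str]:
--     i = next((i for i, c in enumerate(word) if c in delimiters), -1)
--     if i < 0: return [word]
--     tokens = []
--
--     if i > 0: tokens.append(word[:i])
--     tokens.append(word[i])
--
--     if i + 1 < len(word):
--         tokens.extend(delimit(word[i + 1:], delimiters))
--
--     return tokens
-- ===== SOURCE B (Python) =====
-- def delimit(word: str, delimiters: set[str]) -> list[str]:
--     tokens = []
--     buf = []
--     for c in word: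
--         if c in delimiters:
--             if buf:
--                 tokens.append(''.join(buf))
--                 buf = []
--             tokens.append(c)
--         else:
--             buf.append(c)
--     if buf:
--         tokens.append(''.join(buf))
--     return tokens if tokens else [word]
-- ===== Notes on version B (the rewrite author's own statement) =====
-- stated objective: faster
-- what changed: replaced the recursive find-first-delimiter-then-slice-and-recurse scheme (repeated scans and string slicing) by a single left-to-right pass that accumulates the current run in a buffer and emits delimiter characters individually
import Mathlib
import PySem

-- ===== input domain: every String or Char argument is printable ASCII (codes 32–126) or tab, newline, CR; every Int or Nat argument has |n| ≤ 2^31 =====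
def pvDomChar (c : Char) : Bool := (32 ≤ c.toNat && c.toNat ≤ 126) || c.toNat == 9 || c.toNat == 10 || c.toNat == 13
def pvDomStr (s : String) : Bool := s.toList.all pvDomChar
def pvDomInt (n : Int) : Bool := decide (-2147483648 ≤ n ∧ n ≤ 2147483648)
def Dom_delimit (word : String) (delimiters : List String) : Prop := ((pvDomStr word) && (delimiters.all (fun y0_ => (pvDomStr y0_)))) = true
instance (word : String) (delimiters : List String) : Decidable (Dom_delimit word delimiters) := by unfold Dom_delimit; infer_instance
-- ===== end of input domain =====

-- B replaces A's recursive find-first-delimiter-and-slice scheme by one left-to-right pass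
-- accumulating runs in a buffer (faster; a timing run measures the speed-up).

-- ===== PORT A =====
-- A recursively: find index of first delimiter char (-1 if none), emit prefix, the
-- delimiter char, then recurse on the rest.  `delimitGoA` works on the char list.
def delimitGoA (cs : List Char) (ds : List String) : List String :=
  match cs.findIdx? (fun c => ds.contains (String.mk [c])) with
  | none => [String.mk cs]
  | some i =>
      (if 0 < i then [String.mk (cs.take i)] else []) ++
      [String.mk ((cs.drop i).take 1)] ++
      (if h : i + 1 < cs.length then delimitGoA (cs.drop (i + 1)) ds else [])
termination_by cs.length
decreasing_by simp; omega

def delimit (word : String) (delimiters : List String) : List String :=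
  delimitGoA word.toList delimiters

-- ===== PORT B =====
-- one step of B's loop: state = (tokens so far, current buffered run)
def stepB (ds : List String) (st : List String × List Char) (c : Char) : List String × List Char :=
  if ds.contains (String.mk [c]) then
    ((if st.2 ≠ [] then st.1 ++ [String.mk st.2] else st.1) ++ [String.mk [c]], [])
  else
    (st.1, st.2 ++ [c])

def delimit_alt (word : String) (delimiters : List String) : List String :=
  let st := word.toList.foldl (stepB delimiters) ([], [])
  let tokens := if st.2 ≠ [] then st.1 ++ [String.mk st.2] else st.1
  if tokens = [] then [word] else tokens

-- ===== PRECONDITION & SPEC =====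
def Spec_delimit (word : String) (delimiters : List String) (out : List String) : Prop := out = delimit_alt word delimiters
instance (word : String) (delimiters : List String) (out : List String) : Decidable (Spec_delimit word delimiters out) := by unfold Spec_delimit; infer_instance

-- ===== CLAIM (what is proved, stated in full; the proofs are below) =====
def Claim_equal_delimit : Prop := ∀ (word : String) (delimiters : List String), Dom_delimit word delimiters → Spec_delimit word delimiters (delimit word delimiters)

-- ===== LEMMAS AND PROOFS =====

-- flush the final buffer of B's loop state into the token list
def finishB (st : List String × List Char) : List String :=
  if st.2 ≠ [] then st.1 ++ [String.mk st.2] else st.1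

-- the token component only ever grows by appending: starting tokens are a prefix
theorem foldl_stepB_tokens (ds : List String) (cs : List Char) (tokens : List String)
    (buf : List Char) :
    cs.foldl (stepB ds) (tokens, buf) =
      (tokens ++ (cs.foldl (stepB ds) ([], buf)).1, (cs.foldl (stepB ds) ([], buf)).2) := by
  induction cs generalizing tokens buf with
  | nil => simp
  | cons c rest ih =>
    simp only [List.foldl_cons, stepB]
    by_cases hc : ds.contains (String.mk [c]) = true
    · simp only [hc, if_true]
      by_cases hb : buf = []
      · simp only [hb, ne_eq, not_true_eq_false, if_false, List.nil_append]
        rw [ih (tokens ++ [String.mk [c]]) [], ih ([String.mk [c]]) []]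
        simp
      · simp only [hb, ne_eq, not_false_eq_true, ite_true, List.nil_append]
        rw [ih (tokens ++ [String.mk buf] ++ [String.mk [c]]) [],
            ih ([String.mk buf] ++ [String.mk [c]]) []]
        simp
    · simp only [hc]
      exact ih tokens (buf ++ [c])

-- first-delimiter index of `buf ++ c :: rest` when buf is delimiter-free and c is one
theorem findIdx?_buf_cons (p : Char → Bool) (buf : List Char) (c : Char) (rest : List Char)
    (hbuf : ∀ b ∈ buf, p b = false) (hc : p c = true) :
    (buf ++ c :: rest).findIdx? p = some buf.length := by
  induction buf with
  | nil => simp [List.findIdx?_cons, hc]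
  | cons b bs ih =>
    have hb : p b = false := hbuf b (by simp)
    simp only [List.cons_append, List.findIdx?_cons, hb]
    rw [ih (fun x hx => hbuf x (by simp [hx]))]
    simp

-- main invariant: A on buf ++ cs equals B's loop started with buffer buf (buf delimiter-free)
theorem goA_eq_fold (ds : List String) (cs : List Char) (buf : List Char)
    (hbuf : ∀ b ∈ buf, ds.contains (String.mk [b]) = false)
    (hne : cs ≠ [] ∨ buf ≠ []) :
    delimitGoA (buf ++ cs) ds = finishB (cs.foldl (stepB ds) ([], buf)) := by
  induction cs generalizing buf with
  | nil =>
    have hb : buf ≠ [] := by tauto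
    rw [delimitGoA]
    have hfind : (buf ++ ([] : List Char)).findIdx? (fun c => ds.contains (String.mk [c])) = none := by
      rw [List.findIdx?_eq_none_iff]
      intro x hx
      exact hbuf x (by simpa using hx)
    rw [hfind]
    simp [finishB, hb]
  | cons c rest ih =>
    by_cases hc : ds.contains (String.mk [c]) = true
    · -- c is a delimiter: A splits here, B flushes the buffer and emits c
      rw [delimitGoA]
      rw [findIdx?_buf_cons _ buf c rest hbuf hc]
      have htake : (buf ++ c :: rest).take buf.length = buf := by
        simp
      have hget : ((buf ++ c :: rest).drop buf.length).take 1 = [c] := by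
        simp
      have hdrop : (buf ++ c :: rest).drop (buf.length + 1) = rest := by
        rw [List.drop_append]
        simp
      have hlen : (buf ++ c :: rest).length = buf.length + 1 + rest.length := by
        simp; omega
      simp only [List.foldl_cons, stepB, hc, if_true]
      rw [foldl_stepB_tokens]
      rcases eq_or_ne rest [] with h | h
      · subst h
        simp only [htake, hget, hdrop, hlen]
        rw [dif_neg (by simp)]
        by_cases hb : buf = [] <;> simp [hb, finishB, List.length_pos_iff]
      · have hlt : buf.length + 1 < (buf ++ c :: rest).length := by
          rw [hlen]; have := List.length_pos_iff.mpr h; omega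
        simp only [htake, hget, hdrop]
        rw [dif_pos hlt]
        have h0 := ih [] (by intro b hb; simp at hb) (Or.inl h)
        rw [List.nil_append] at h0
        rw [h0]
        by_cases hb : buf = [] <;> simp [hb, finishB, List.length_pos_iff] <;>
          split_ifs <;> simp
    · -- c is not a delimiter: it joins the buffer
      have : buf ++ c :: rest = (buf ++ [c]) ++ rest := by simp
      rw [this]
      rw [ih (buf ++ [c])
            (by intro b hb; rcases List.mem_append.mp hb with h | h
                · exact hbuf b h
                · simp at h; subst h; simpa using hc)
            (Or.inr (by simp))]
      simp only [List.foldl_cons, stepB, hc, if_false, Bool.false_eq_true]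

-- ===== VERDICT (by name: the statement is the Claim_ definition above) =====
theorem delimit_spec : Claim_equal_delimit := by
  intro word ds _
  unfold Spec_delimit delimit delimit_alt
  rcases eq_or_ne word.toList [] with h | h
  · -- empty word: A returns [word], B's loop produces no token and falls back to [word]
    have hw : word = "" := String.toList_inj.mp (by simpa using h)
    subst hw
    rw [delimitGoA]
    simp [List.findIdx?, List.findIdx?.go, show String.mk ([]:List Char) = "" from rfl]
  · have := goA_eq_fold ds word.toList [] (by intro b hb; simp at hb) (Or.inl h)
    simp only [List.nil_append] at this
    rw [this]
    -- the result of the loop on a nonempty word is a nonempty token list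
    have hne : finishB (word.toList.foldl (stepB ds) ([], [])) ≠ [] := by
      clear this
      have key : ∀ (cs : List Char) (buf : List Char), cs ≠ [] ∨ buf ≠ [] →
          finishB (cs.foldl (stepB ds) ([], buf)) ≠ [] := by
        intro cs
        induction cs with
        | nil =>
          intro buf hb
          have : buf ≠ [] := by tauto
          simp [finishB, this]
        | cons x xs ihx =>
          intro buf _
          simp only [List.foldl_cons, stepB]
          by_cases hx : ds.contains (String.mk [x]) = true
          · simp only [hx, if_true]
            rw [foldl_stepB_tokens]
            rcases eq_or_ne xs [] with hxs | hxs
            · subst hxs; by_cases hb : buf = [] <;> simp [hb, finishB]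
            · have := ihx [] (Or.inl hxs)
              by_cases hb : buf = [] <;> simp [hb, finishB] <;>
                [skip; skip] <;> simp_all [finishB] <;>
                (by_cases h2 : (xs.foldl (stepB ds) ([], [])).2 = [] <;> simp_all)
          · simp only [hx]
            exact ihx (buf ++ [x]) (Or.inr (by simp))
      exact key word.toList [] (Or.inl h)
    simp only [finishB] at hne ⊢
    split_ifs with h1 h2 h2 <;> simp_all
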